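-- pv_equiv track=rewrite | github.com/4rutyun/Zadania | task1/task1.py | circular_array_path
-- ===== SOURCE A (Python) =====
-- def circular_array_path(n, m):
--     # Создаем круговой массив от 1 до n
--     circular_array = list(range(1, n + 1))
--     path = []
--     index = 0
--
--     # Пока не вернемся к первому элементу
--     while True:
--         # Добавляем начальный элемент интервала в путь
--         path.append(circular_array[index])
--         # Вычисляем следующий индекс, начиная с последнего элемента текущего интервала
--         index = (index + m - 1) % n
--         # Если вернулись к первому элементу, выходим из цикла
--         if index == 0:
--             break
--
--     return path
-- ===== SOURCE B (Python) =====
-- def _gcd(a, b):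
--     while b:
--         a, b = b, a % b
--     return a if a >= 0 else -a
--
--
-- def circular_array_path(n, m):
--     # Number-theoretic closed form: the walk k -> k + (m-1) (mod n) starting
--     # at 0 returns to 0 after exactly n // gcd(n, m-1) steps, so the path can
--     # be produced by direct indexing instead of stepping a running index.
--     step = m - 1
--     length = n // _gcd(n, step)
--     return [k * step % n + 1 for k in range(length)]
-- ===== Notes on version B (the rewrite author's own statement) =====
-- stated objective: faster
-- what changed: B replaces A's index-stepping while-loop (walk by m-1 mod n until the index returns to 0) by a number-theoretic closed form: the path length is n // gcd(n, m-1), so B emits the path with a single direct-indexing comprehension; same O(n) asymptotics, measurably faster by a constant factor.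
import Mathlib
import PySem

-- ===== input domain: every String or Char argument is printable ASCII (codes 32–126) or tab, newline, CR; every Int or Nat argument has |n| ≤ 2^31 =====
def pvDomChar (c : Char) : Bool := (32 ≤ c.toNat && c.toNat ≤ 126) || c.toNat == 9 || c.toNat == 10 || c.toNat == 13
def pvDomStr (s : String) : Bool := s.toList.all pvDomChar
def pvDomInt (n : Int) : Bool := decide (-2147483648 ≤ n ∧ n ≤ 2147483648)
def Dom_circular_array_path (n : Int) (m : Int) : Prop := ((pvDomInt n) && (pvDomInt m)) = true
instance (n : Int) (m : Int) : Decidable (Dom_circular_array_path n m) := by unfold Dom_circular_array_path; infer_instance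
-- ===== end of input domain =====

-- B replaces A's index-stepping while-loop by the closed-form path length n // gcd(n, m-1)
-- and a direct-indexing comprehension (same O(n) asymptotics, measured constant-factor faster).

-- ===== PORT A =====
-- A's while-True loop: fuel only makes the recursion structural (never exhausted under Pre_);
-- a failing element access (Python's IndexError, excluded by Pre_) stops the loop.
def caLoop (arr : List Int) (n : Int) (m : Int) : Nat → Int → List Int → List Int
  | 0, _, path => path.reverse
  | fuel + 1, index, path =>
    match PySem.List.pyGet? arr index with
    | none => path.reverse
    | some v =>
      let index' := PySem.Int.mod (index + m - 1) n
      if index' = 0 then (v :: path).reverse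
      else caLoop arr n m fuel index' (v :: path)

def circular_array_path (n : Int) (m : Int) : List Int :=
  caLoop (PySem.List.pyRange 1 (n + 1) 1) n m (n.toNat + 1) 0 []

-- ===== PORT B =====
-- the hand-written Euclid loop of Source B (while b: a, b = b, a % b), with fuel for structure
def gcdLoop : Nat → Int → Int → Int
  | 0, a, _ => a
  | fuel + 1, a, b => if b = 0 then a else gcdLoop fuel b (PySem.Int.mod a b)

def pyGcd (a : Int) (b : Int) : Int :=
  let g := gcdLoop (b.natAbs + 1) a b
  if 0 ≤ g then g else -g

def circular_array_path_alt (n : Int) (m : Int) : List Int :=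
  let step := m - 1
  let length := PySem.Int.floordiv n (pyGcd n step)
  (PySem.List.pyRange 0 length 1).map (fun k => PySem.Int.mod (k * step) n + 1)

-- ===== PRECONDITION & SPEC =====
-- Pre_ excludes exactly n ≤ 0, where A's first element access raises IndexError.
def Pre_circular_array_path (n : Int) (m : Int) : Prop := 1 ≤ n
instance (n : Int) (m : Int) : Decidable (Pre_circular_array_path n m) := by
  unfold Pre_circular_array_path; infer_instance

def pvWitness_circular_array_path : Int × Int := (6, 3)

def Spec_circular_array_path (n : Int) (m : Int) (out : List Int) : Prop :=
  out = circular_array_path_alt n m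
instance (n : Int) (m : Int) (out : List Int) : Decidable (Spec_circular_array_path n m out) := by
  unfold Spec_circular_array_path; infer_instance

-- ===== CLAIM (what is proved, stated in full; the proofs are below) =====
def Claim_equal_circular_array_path : Prop := ∀ (n : Int) (m : Int),
  Dom_circular_array_path n m → Pre_circular_array_path n m →
  Spec_circular_array_path n m (circular_array_path n m)

-- ===== LEMMAS AND PROOFS =====

-- the position of A's running index after t steps, and B's k-th list entry minus 1
def pvF (n : Int) (step : Int) (t : Nat) : Int := ((t : Int) * step) % n

-- the common path length, as a natural number
def pvL (n : Int) (step : Int) : Nat := n.toNat / Int.gcd n step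

lemma pvF_zero (n step : Int) : pvF n step 0 = 0 := by simp [pvF]

lemma pvF_bounds (n step : Int) (t : Nat) (hn : 1 ≤ n) :
    0 ≤ pvF n step t ∧ pvF n step t < n :=
  ⟨Int.emod_nonneg _ (by omega), Int.emod_lt_of_pos _ (by omega)⟩

lemma pvL_pos (n step : Int) (hn : 1 ≤ n) : 0 < pvL n step := by
  have hg : 0 < Int.gcd n step := Int.gcd_pos_of_ne_zero_left step (by omega)
  have hdvd : (Int.gcd n step : Int) ∣ n := Int.gcd_dvd_left n step
  have : Int.gcd n step ≤ n.toNat := by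
    have := Int.le_of_dvd (by omega) hdvd; omega
  exact Nat.div_pos this hg

lemma pvL_le (n step : Int) : pvL n step ≤ n.toNat := Nat.div_le_self _ _

lemma pvL_cast (n step : Int) (hn : 1 ≤ n) :
    ((pvL n step : Nat) : Int) = n / (Int.gcd n step : Int) := by
  unfold pvL; rw [Int.natCast_div]; congr 1; omega

-- the walk is back at 0 after pvL steps
lemma pvF_L (n step : Int) (hn : 1 ≤ n) : pvF n step (pvL n step) = 0 := by
  have hdvdn : (Int.gcd n step : Int) ∣ n := Int.gcd_dvd_left n step
  have hdvds : (Int.gcd n step : Int) ∣ step := Int.gcd_dvd_right n step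
  obtain ⟨c, hc⟩ := hdvds
  have hdvd : n ∣ ((pvL n step : Nat) : Int) * step := by
    refine ⟨c, ?_⟩
    rw [pvL_cast n step hn]
    calc n / (Int.gcd n step : Int) * step
        = n / (Int.gcd n step : Int) * ((Int.gcd n step : Int) * c) := by rw [← hc]
      _ = (n / (Int.gcd n step : Int) * (Int.gcd n step : Int)) * c := by ring
      _ = n * c := by rw [Int.ediv_mul_cancel hdvdn]
  exact Int.emod_eq_zero_of_dvd hdvd

-- and not earlier
lemma pvF_ne_zero (n step : Int) (t : Nat) (hn : 1 ≤ n) (ht0 : 0 < t)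
    (htL : t < pvL n step) : pvF n step t ≠ 0 := by
  intro h0
  have hdvd : n ∣ (t : Int) * step := Int.dvd_of_emod_eq_zero h0
  have hg : 0 < Int.gcd n step := Int.gcd_pos_of_ne_zero_left step (by omega)
  have hgz : ((Int.gcd n step : Int)) ≠ 0 := by exact_mod_cast hg.ne'
  have hdvdn : (Int.gcd n step : Int) ∣ n := Int.gcd_dvd_left n step
  have hdvds : (Int.gcd n step : Int) ∣ step := Int.gcd_dvd_right n step
  set G : Int := (Int.gcd n step : Int) with hG
  set n' : Int := n / G with hn'
  set c : Int := step / G with hc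
  have hcop : Int.gcd n' c = 1 := Int.gcd_div_gcd_div_gcd hg
  have hnn : n = G * n' := (Int.mul_ediv_cancel' hdvdn).symm
  have hss : step = G * c := (Int.mul_ediv_cancel' hdvds).symm
  obtain ⟨k, hk⟩ := hdvd
  have hdd : n' ∣ (t : Int) * c := by
    refine ⟨k, ?_⟩
    have : G * ((t : Int) * c) = G * (n' * k) := by
      rw [hnn, hss] at hk; linarith [hk]
    exact mul_left_cancel₀ hgz this
  have hcop' : IsCoprime n' c := Int.isCoprime_iff_gcd_eq_one.mpr hcop
  have hdt : n' ∣ (t : Int) := hcop'.dvd_of_dvd_mul_right hdd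
  have hle : n' ≤ (t : Int) := Int.le_of_dvd (by exact_mod_cast ht0) hdt
  have hLt : ((pvL n step : Nat) : Int) = n' := pvL_cast n step hn
  omega

-- one step of A's index update advances the walk
lemma pvF_succ (n m : Int) (t : Nat) (hn : 1 ≤ n) :
    PySem.Int.mod (pvF n (m - 1) t + m - 1) n = pvF n (m - 1) (t + 1) := by
  rw [PySem.Int.mod_eq_emod_of_pos (show (0 : Int) < n by omega)]
  unfold pvF
  have h1 : (t : Int) * (m - 1) % n + m - 1 = (t : Int) * (m - 1) % n + (m - 1) := by ring
  rw [h1, Int.emod_add_emod]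
  congr 1; push_cast; ring

-- reading circular_array[i] for 0 ≤ i < n gives i + 1
lemma pvArr_get (n i : Int) (h0 : 0 ≤ i) (hn : i < n) :
    PySem.List.pyGet? (PySem.List.pyRange 1 (n + 1) 1) i = some (i + 1) := by
  rw [PySem.List.pyGet?_of_nonneg _ h0, PySem.List.getElem?_pyRange_one]
  rw [if_pos (by omega)]
  congr 1; omega

-- invariant of A's loop: entered with index pvF j (j < L) it emits positions j … L-1
lemma caLoop_inv (n m : Int) (hn : 1 ≤ n) : ∀ (fuel j : Nat) (acc : List Int),
    j < pvL n (m - 1) → pvL n (m - 1) - j ≤ fuel →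
    caLoop (PySem.List.pyRange 1 (n + 1) 1) n m fuel (pvF n (m - 1) j) acc
      = acc.reverse ++ (List.range (pvL n (m - 1) - j)).map (fun k => pvF n (m - 1) (j + k) + 1) := by
  intro fuel
  induction fuel with
  | zero => intro j acc h1 h2; omega
  | succ f ih =>
    intro j acc h1 h2
    obtain ⟨hb0, hb1⟩ := pvF_bounds n (m - 1) j hn
    simp only [caLoop, pvArr_get n _ hb0 hb1, pvF_succ n m j hn]
    by_cases hend : j + 1 = pvL n (m - 1)
    · rw [if_pos (by rw [hend]; exact pvF_L n (m - 1) hn)]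
      have : pvL n (m - 1) - j = 1 := by omega
      rw [this]
      simp
    · rw [if_neg (pvF_ne_zero n (m - 1) (j + 1) hn (by omega) (by omega))]
      rw [ih (j + 1) _ (by omega) (by omega)]
      have hsplit : pvL n (m - 1) - j = (pvL n (m - 1) - (j + 1)) + 1 := by omega
      have hmap : List.map (fun k => pvF n (m - 1) (j + 1 + k) + 1)
            (List.range (pvL n (m - 1) - (j + 1)))
          = List.map ((fun k => pvF n (m - 1) (j + k) + 1) ∘ Nat.succ)
            (List.range (pvL n (m - 1) - (j + 1))) := by
        apply List.map_congr_left
        intro k _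
        simp only [Function.comp_apply]
        congr 2
        omega
      rw [hsplit, List.range_succ_eq_map, hmap]
      simp

-- Euclid loop computes gcd up to sign
lemma gcdLoop_natAbs (fuel : Nat) : ∀ (a b : Int), b.natAbs < fuel →
    (gcdLoop fuel a b).natAbs = Int.gcd a b := by
  induction fuel with
  | zero => intro a b h; omega
  | succ f ih =>
    intro a b h
    by_cases hb : b = 0
    · simp [gcdLoop, hb]
    · have hmod : PySem.Int.mod a b = a - PySem.Int.floordiv a b * b := by
        have := PySem.Int.floordiv_mul_add_mod a b; omega
      have hlt : (PySem.Int.mod a b).natAbs < b.natAbs := by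
        rcases lt_or_gt_of_ne hb with hneg | hpos
        · have := PySem.Int.mod_neg_bounds a hneg; omega
        · have h1 := PySem.Int.mod_nonneg a hpos
          have h2 := PySem.Int.mod_lt a hpos; omega
      rw [gcdLoop, if_neg hb, ih b _ (by omega)]
      rw [hmod, Int.gcd_comm]
      exact Int.gcd_sub_mul_right_left b a _

-- Source B's _gcd is Int.gcd
lemma pyGcd_eq (a b : Int) : pyGcd a b = ((Int.gcd a b : Nat) : Int) := by
  have h := gcdLoop_natAbs (b.natAbs + 1) a b (by omega)
  show (if 0 ≤ gcdLoop (b.natAbs + 1) a b then gcdLoop (b.natAbs + 1) a b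
        else -(gcdLoop (b.natAbs + 1) a b)) = ((Int.gcd a b : Nat) : Int)
  split_ifs with hg <;> omega

-- B's length expression is (pvL : Int)
lemma pvLen_eq (n m : Int) (hn : 1 ≤ n) :
    PySem.Int.floordiv n (pyGcd n (m - 1)) = ((pvL n (m - 1) : Nat) : Int) := by
  rw [pyGcd_eq]
  have h1 : n = ((n.toNat : Nat) : Int) := by omega
  calc PySem.Int.floordiv n ((Int.gcd n (m - 1) : Nat) : Int)
      = PySem.Int.floordiv ((n.toNat : Nat) : Int) ((Int.gcd n (m - 1) : Nat) : Int) := by rw [← h1]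
    _ = ((n.toNat / Int.gcd n (m - 1) : Nat) : Int) := PySem.Int.floordiv_natCast _ _
    _ = ((pvL n (m - 1) : Nat) : Int) := rfl

-- ===== VERDICT (by name: the statement is the Claim_ definition above) =====
theorem circular_array_path_spec : Claim_equal_circular_array_path := by
  intro n m _ hpre
  unfold Pre_circular_array_path at hpre
  unfold Spec_circular_array_path circular_array_path circular_array_path_alt
  have hA : caLoop (PySem.List.pyRange 1 (n + 1) 1) n m (n.toNat + 1) 0 []
      = (List.range (pvL n (m - 1))).map (fun k => pvF n (m - 1) k + 1) := by
    have h0 := caLoop_inv n m hpre (n.toNat + 1) 0 [] (pvL_pos n (m - 1) hpre)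
      (by have := pvL_le n (m - 1); omega)
    rw [pvF_zero] at h0
    simpa using h0
  rw [hA]
  show List.map (fun k => pvF n (m - 1) k + 1) (List.range (pvL n (m - 1)))
      = (PySem.List.pyRange 0 (PySem.Int.floordiv n (pyGcd n (m - 1))) 1).map
          (fun k => PySem.Int.mod (k * (m - 1)) n + 1)
  rw [pvLen_eq n m hpre, PySem.List.pyRange_zero_nat, List.map_map]
  apply List.map_congr_left
  intro k _
  simp only [Function.comp_apply]
  rw [PySem.Int.mod_eq_emod_of_pos (show (0 : Int) < n by omega)]
  rfl
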